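-- pv_equiv track=rewrite | github.com/swaroopa18/Learnings | DSA/backtrack/301-M-remove-invalid-brackets.py | getInvalidCount
-- ===== SOURCE A (Python) =====
-- def getInvalidCount(s):
--     """Calculate minimum removals needed"""
--     stack = []
--     for char in s:
--         if char == "(":
--             stack.append(char)
--         elif char == ")":
--             if stack and stack[-1] == "(":
--                 stack.pop()
--             else:
--                 stack.append(char)
--     return len(stack)
-- ===== SOURCE B (Python) =====
-- def getInvalidCount(s):
--     """Calculate minimum removals needed"""
--     balance = 0
--     min_balance = 0
--     for char in s:
--         if char == "(":
--             balance += 1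
--         elif char == ")":
--             balance -= 1
--             if balance < min_balance:
--                 min_balance = balance
--     return balance - 2 * min_balance
-- ===== Notes on version B (the rewrite author's own statement) =====
-- stated objective: alternative
-- what changed: B does no bracket matching at all: each closing bracket unconditionally decrements a running balance whose minimum over prefixes is tracked, and the answer is the closed formula balance - 2*min_balance; A simulates matching with a stack and returns its final length.
import Mathlib
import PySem

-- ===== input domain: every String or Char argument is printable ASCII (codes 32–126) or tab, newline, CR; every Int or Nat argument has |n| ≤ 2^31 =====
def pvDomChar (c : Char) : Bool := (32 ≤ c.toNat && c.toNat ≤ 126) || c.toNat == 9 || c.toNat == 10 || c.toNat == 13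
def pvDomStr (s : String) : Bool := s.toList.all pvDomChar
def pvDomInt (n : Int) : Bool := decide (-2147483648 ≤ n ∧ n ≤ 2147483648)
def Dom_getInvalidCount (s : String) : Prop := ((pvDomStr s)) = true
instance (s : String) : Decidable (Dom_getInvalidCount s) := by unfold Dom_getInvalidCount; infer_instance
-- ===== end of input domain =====

-- B replaces A's stack simulation of bracket matching by a matching-free formula:
-- running balance plus its minimum over prefixes, answer = balance - 2*min_balance.

-- ===== PORT A =====
-- one step of A's loop body: push '(', match or push ')' (stack[-1] via getLast?), ignore others
def pvStepA (stack : List Char) (c : Char) : List Char :=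
  if c = '(' then stack ++ ['(']
  else if c = ')' then
    if stack.getLast? = some '(' then stack.dropLast
    else stack ++ [')']
  else stack

def getInvalidCount (s : String) : Int :=
  ((s.toList.foldl pvStepA []).length : Int)

-- ===== PORT B =====
-- one step of B's loop body over (balance, min_balance)
def pvStepB (st : Int × Int) (c : Char) : Int × Int :=
  if c = '(' then (st.1 + 1, st.2)
  else if c = ')' then
    (st.1 - 1, if st.1 - 1 < st.2 then st.1 - 1 else st.2)
  else st

def getInvalidCount_alt (s : String) : Int :=
  let st := s.toList.foldl pvStepB (0, 0)
  st.1 - 2 * st.2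

-- ===== PRECONDITION & SPEC =====
def Spec_getInvalidCount (s : String) (out : Int) : Prop := out = getInvalidCount_alt s
instance (s : String) (out : Int) : Decidable (Spec_getInvalidCount s out) := by unfold Spec_getInvalidCount; infer_instance

-- ===== CLAIM (what is proved, stated in full; the proofs are below) =====
def Claim_equal_getInvalidCount : Prop := ∀ (s : String), Dom_getInvalidCount s → Spec_getInvalidCount s (getInvalidCount s)

-- ===== LEMMAS AND PROOFS =====

-- Invariant: A's stack is cl copies of ')' below op copies of '(' exactly when
-- B's state is (balance, min_balance) = (op - cl, -cl).
theorem pv_inv (l : List Char) (op cl : Nat) :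
    ((l.foldl pvStepA (List.replicate cl ')' ++ List.replicate op '(')).length : Int)
      = (l.foldl pvStepB ((op : Int) - (cl : Int), -(cl : Int))).1
        - 2 * (l.foldl pvStepB ((op : Int) - (cl : Int), -(cl : Int))).2 := by
  induction l generalizing op cl with
  | nil =>
      simp [List.length_append]
      ring
  | cons c l ih =>
      simp only [List.foldl_cons]
      by_cases hop : c = '('
      · subst hop
        have hA : pvStepA (List.replicate cl ')' ++ List.replicate op '(') '('
            = List.replicate cl ')' ++ List.replicate (op + 1) '(' := by
          simp [pvStepA, List.replicate_succ' (n := op)]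
        have hB : pvStepB ((op : Int) - (cl : Int), -(cl : Int)) '('
            = ((op : Int) + 1 - (cl : Int), -(cl : Int)) := by
          simp [pvStepB]; ring
        rw [hA, hB]
        have := ih (op + 1) cl
        push_cast at this
        exact this
      · by_cases hcl : c = ')'
        · subst hcl
          cases op with
          | zero =>
              have hA : pvStepA (List.replicate cl ')' ++ List.replicate 0 '(') ')'
                  = List.replicate (cl + 1) ')' ++ List.replicate 0 '(' := by
                cases cl with
                | zero => simp [pvStepA]
                | succ m =>
                    simp [pvStepA, List.getLast?_replicate, List.replicate_succ' (n := m),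
                      List.replicate_succ' (n := m + 1)]
              have hB : pvStepB ((0 : Nat) - (cl : Int), -(cl : Int))
                    ')' = (((0 : Nat) : Int) - ((cl : Int) + 1), -((cl : Int) + 1)) := by
                simp [pvStepB]
                ring
              rw [hA, hB]
              have := ih 0 (cl + 1)
              push_cast at this ⊢
              exact this
          | succ m =>
              have hA : pvStepA (List.replicate cl ')' ++ List.replicate (m + 1) '(') ')'
                  = List.replicate cl ')' ++ List.replicate m '(' := by
                simp [pvStepA, List.replicate_succ' (n := m), ← List.append_assoc]
              have hB : pvStepB (((m + 1 : Nat) : Int) - (cl : Int), -(cl : Int)) ')'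
                  = ((m : Int) - (cl : Int), -(cl : Int)) := by
                simp [pvStepB]
                ring
              rw [hA, hB]
              exact ih m cl
        · have hA : pvStepA (List.replicate cl ')' ++ List.replicate op '(') c
              = List.replicate cl ')' ++ List.replicate op '(' := by
            simp [pvStepA, hop, hcl]
          have hB : pvStepB ((op : Int) - (cl : Int), -(cl : Int)) c
              = ((op : Int) - (cl : Int), -(cl : Int)) := by
            simp [pvStepB, hop, hcl]
          rw [hA, hB]
          exact ih op cl

-- ===== VERDICT (by name: the statement is the Claim_ definition above) =====
theorem getInvalidCount_spec : Claim_equal_getInvalidCount := by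
  intro s _
  unfold Spec_getInvalidCount getInvalidCount getInvalidCount_alt
  have := pv_inv s.toList 0 0
  simpa using this
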